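-- pv_equiv track=rewrite | github.com/linlong5201314/grok2api | app/products/openai/_tool_sieve.py | _split_at_any_boundary
-- ===== SOURCE A (Python) =====
-- def _split_at_any_boundary(text: str, prefixes: tuple[str, ...]) -> tuple[str, str]:
--     """Split text so that any partial match of *prefix* at the end stays in
--     the leftover buffer (to be checked again on the next chunk)."""
--     lower_text = text.lower()
--     lowered_prefixes = tuple(prefix.lower() for prefix in prefixes)
--     max_len = min(max(len(prefix) for prefix in lowered_prefixes) - 1, len(text))
--     for i in range(max_len, 0, -1):
--         suffix = lower_text[-i:]
--         if any(prefix.startswith(suffix) for prefix in lowered_prefixes):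
--             return text[: -i], text[-i:]
--     return text, ""
-- ===== SOURCE B (Python) =====
-- def _split_at_any_boundary(text: str, prefixes: tuple[str, ...]) -> tuple[str, str]:
--     """Split text so that any partial match of *prefix* at the end stays in
--     the leftover buffer (per-prefix running-max overlap instead of
--     longest-first suffix scan)."""
--     lower_text = text.lower()
--     cap = min(max(len(prefix) for prefix in prefixes) - 1, len(text))
--     best = 0
--     for prefix in prefixes:
--         pl = prefix.lower()
--         k = min(len(pl), cap)
--         while k > 0 and not lower_text.endswith(pl[:k]):
--             k -= 1
--         if k > best:
--             best = k
--     if best > 0: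
--         return text[:-best], text[-best:]
--     return text, ""
-- ===== Notes on version B (the rewrite author's own statement) =====
-- stated objective: alternative
-- what changed: B iterates over the prefixes, computing for each one its longest case-insensitive overlap with the end of the text and keeping a running maximum, instead of A's longest-first scan over candidate suffix lengths with an inner any() over all prefixes.
import Mathlib
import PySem

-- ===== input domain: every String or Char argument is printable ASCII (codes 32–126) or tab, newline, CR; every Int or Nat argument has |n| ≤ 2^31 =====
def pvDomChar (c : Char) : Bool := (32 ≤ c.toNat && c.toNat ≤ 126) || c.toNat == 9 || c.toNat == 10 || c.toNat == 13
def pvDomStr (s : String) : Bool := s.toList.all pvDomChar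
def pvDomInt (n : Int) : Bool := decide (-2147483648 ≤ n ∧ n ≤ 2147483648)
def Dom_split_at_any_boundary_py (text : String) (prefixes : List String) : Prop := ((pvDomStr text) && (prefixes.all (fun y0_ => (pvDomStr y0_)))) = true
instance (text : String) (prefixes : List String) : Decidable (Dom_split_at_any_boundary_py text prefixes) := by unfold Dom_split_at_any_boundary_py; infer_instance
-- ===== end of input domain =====

-- B replaces A's longest-first scan over candidate suffix lengths by a per-prefix
-- longest-overlap computation with a running maximum over the prefixes (alternative
-- decomposition, same exact return value).

-- ===== PORT A =====
def pvAsplit (text : String) (i : Int) : String × String :=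
  (String.ofList (PySem.List.slice text.toList none (some (-i))),
   String.ofList (PySem.List.slice text.toList (some (-i)) none))

def pvAloop (text : String) (lowerText : List Char) (lps : List (List Char)) : List Int → String × String
  | [] => (text, "")
  | i :: rest =>
      let suffix := PySem.List.slice lowerText (some (-i)) none
      if lps.any (fun p => PySem.Chars.startswith p suffix) then pvAsplit text i
      else pvAloop text lowerText lps rest

def split_at_any_boundary_py (text : String) (prefixes : List String) : String × String :=
  let lowerText := PySem.Chars.lower text.toList
  let lps := prefixes.map (fun p => PySem.Chars.lower p.toList)
  let maxLen : Int :=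
    min (((PySem.List.max? (lps.map (fun p => p.length)) (fun x => x)).getD 0 : Nat) - 1 : Int)
        (text.toList.length : Int)
  pvAloop text lowerText lps (PySem.List.pyRange maxLen 0 (-1))

-- ===== PORT B =====
def pvOverlap (lowerText : List Char) (pl : List Char) : Nat → Nat
  | 0 => 0
  | k+1 => if PySem.Chars.endswith lowerText (pl.take (k+1)) then k+1 else pvOverlap lowerText pl k

def split_at_any_boundary_py_alt (text : String) (prefixes : List String) : String × String :=
  let lowerText := PySem.Chars.lower text.toList
  let cap : Int :=
    min (((PySem.List.max? (prefixes.map (fun p => p.toList.length)) (fun x => x)).getD 0 : Nat) - 1 : Int)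
        (text.toList.length : Int)
  let best := prefixes.foldl (fun b p =>
      let pl := PySem.Chars.lower p.toList
      max b (pvOverlap lowerText pl (min (pl.length : Int) cap).toNat)) 0
  if 0 < best then
    (String.ofList (PySem.List.slice text.toList none (some (-(best : Int)))),
     String.ofList (PySem.List.slice text.toList (some (-(best : Int))) none))
  else (text, "")

-- ===== PRECONDITION & SPEC =====
-- Pre_ excludes only the empty prefix list, on which Python A raises ValueError (max() of an empty sequence).
def Pre_split_at_any_boundary_py (text : String) (prefixes : List String) : Prop := prefixes ≠ []
instance (text : String) (prefixes : List String) : Decidable (Pre_split_at_any_boundary_py text prefixes) := by unfold Pre_split_at_any_boundary_py; infer_instance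

def pvWitness_split_at_any_boundary_py : String × List String := ("Hello <t", ["<think>", "<TOOL>"])

def Spec_split_at_any_boundary_py (text : String) (prefixes : List String) (out : String × String) : Prop := out = split_at_any_boundary_py_alt text prefixes
instance (text : String) (prefixes : List String) (out : String × String) : Decidable (Spec_split_at_any_boundary_py text prefixes out) := by unfold Spec_split_at_any_boundary_py; infer_instance

-- ===== CLAIM (what is proved, stated in full; the proofs are below) =====
def Claim_equal_split_at_any_boundary_py : Prop := ∀ (text : String) (prefixes : List String), Dom_split_at_any_boundary_py text prefixes → Pre_split_at_any_boundary_py text prefixes → Spec_split_at_any_boundary_py text prefixes (split_at_any_boundary_py text prefixes)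

-- ===== LEMMAS AND PROOFS =====

-- greatest i ≤ n with p i (0 if none): the common countdown skeleton of both loops
def pvGdown (p : Nat → Bool) : Nat → Nat
  | 0 => 0
  | n+1 => if p (n+1) then n+1 else pvGdown p n

theorem pvGdown_le (p : Nat → Bool) (n : Nat) : pvGdown p n ≤ n := by
  induction n with
  | zero => simp [pvGdown]
  | succ n ih => simp only [pvGdown]; split <;> omega

theorem pvGdown_holds (p : Nat → Bool) (n : Nat) (h : 0 < pvGdown p n) : p (pvGdown p n) = true := by
  induction n with
  | zero => simp [pvGdown] at h
  | succ n ih =>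
      simp only [pvGdown] at h ⊢
      by_cases hp : p (n+1) = true
      · rw [if_pos hp] at h ⊢; exact hp
      · rw [if_neg hp] at h ⊢; exact ih h

theorem pvGdown_ge (p : Nat → Bool) (n i : Nat) (hi : p i = true) (hin : i ≤ n) : i ≤ pvGdown p n := by
  induction n with
  | zero => simp only [pvGdown]; omega
  | succ n ih =>
      simp only [pvGdown]
      by_cases hp : p (n+1) = true
      · rw [if_pos hp]; exact hin
      · rw [if_neg hp]
        rcases Nat.lt_or_ge i (n+1) with h | h
        · exact ih (by omega)
        · have hieq : i = n+1 := by omega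
          exact absurd (hieq ▸ hi) hp

theorem pv_length_lower (l : List Char) : (PySem.Chars.lower l).length = l.length := by
  simp [PySem.Chars.lower]

-- Python equivalence of the two membership tests: for 0 < i ≤ |L|,
-- prefix.startswith(L[-i:])  =  (i ≤ |prefix|  and  L.endswith(prefix[:i]))
theorem pv_sw_ew (L pl : List Char) (i : Nat) (h0 : 0 < i) (hL : i ≤ L.length) :
    PySem.Chars.startswith pl (L.drop (L.length - i)) = true
      ↔ (i ≤ pl.length ∧ PySem.Chars.endswith L (pl.take i) = true) := by
  have hslen : (L.drop (L.length - i)).length = i := by simp; omega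
  simp only [PySem.Chars.startswith, PySem.Chars.endswith,
    List.isPrefixOf_iff_prefix, List.isSuffixOf_iff_suffix]
  constructor
  · intro h
    have hlp : i ≤ pl.length := by have := h.length_le; omega
    refine ⟨hlp, ?_⟩
    have heq : pl.take i = L.drop (L.length - i) := by
      have := List.prefix_iff_eq_take.mp h
      rw [hslen] at this
      exact this.symm
    rw [heq]
    exact List.drop_suffix _ _
  · rintro ⟨hlp, h⟩
    have htlen : (pl.take i).length = i := by simp; omega
    have heq : pl.take i = L.drop (L.length - i) := by
      have := List.suffix_iff_eq_drop.mp h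
      rw [htlen] at this
      exact this
    rw [List.prefix_iff_eq_take, hslen, ← heq]

-- the split both programs produce for a positive overlap n (and (text, "") for n = 0)
def pvGout (text : String) (n : Nat) : String × String :=
  if 0 < n then
    (String.ofList (text.toList.take (text.toList.length - n)),
     String.ofList (text.toList.drop (text.toList.length - n)))
  else (text, "")

-- A's predicate: some lowered prefix starts with the last-i suffix of the lowered text
def pvPA (L : List Char) (lps : List (List Char)) (i : Nat) : Bool :=
  lps.any (fun pl => PySem.Chars.startswith pl (L.drop (L.length - i)))

-- A's loop over range(n, 0, -1) is the countdown search for the greatest matching i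
theorem pvAloop_eq (text : String) (L : List Char) (lps : List (List Char)) (n : Nat)
    (hn : n ≤ L.length) (hlen : L.length = text.toList.length) :
    pvAloop text L lps (PySem.List.pyRange (n : Int) 0 (-1)) = pvGout text (pvGdown (pvPA L lps) n) := by
  induction n with
  | zero =>
      rw [PySem.List.pyRange_neg_one_eq_nil (by omega)]
      simp [pvAloop, pvGdown, pvGout]
  | succ n ih =>
      rw [show ((n+1 : Nat) : Int) = (n : Int) + 1 by push_cast; ring]
      rw [PySem.List.pyRange_neg_one_cons (by omega)]
      rw [show ((n : Int) + 1 - 1) = (n : Int) by ring]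
      simp only [pvAloop]
      rw [show (-((n : Int) + 1)) = (-(((n+1 : Nat)) : Int)) by push_cast; ring]
      rw [PySem.List.slice_from_neg_natCast L (n+1) (by omega)]
      by_cases hmatch : pvPA L lps (n+1) = true
      · rw [if_pos (by simpa [pvPA] using hmatch)]
        simp only [pvGdown, hmatch, if_pos]
        rw [pvGout, if_pos (by omega)]
        rw [pvAsplit]
        rw [show (-((n : Int) + 1)) = (-(((n+1 : Nat)) : Int)) by push_cast; ring]
        rw [PySem.List.slice_to_neg_natCast text.toList (n+1) (by omega),
            PySem.List.slice_from_neg_natCast text.toList (n+1) (by omega)]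
      · rw [if_neg (by simpa [pvPA] using hmatch)]
        simp only [pvGdown, hmatch, if_neg, Bool.false_eq_true, not_false_eq_true]
        exact ih (by omega)

-- B's per-prefix while loop is the countdown search for that prefix's overlap
theorem pvOverlap_eq (L pl : List Char) (k : Nat) :
    pvOverlap L pl k = pvGdown (fun i => PySem.Chars.endswith L (pl.take i)) k := by
  induction k with
  | zero => simp [pvOverlap, pvGdown]
  | succ k ih => simp only [pvOverlap, pvGdown, ih]

theorem pv_foldl_max_le (t : List Nat) (a c : Nat) (ha : a ≤ c) (h : ∀ y ∈ t, y ≤ c) :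
    t.foldl max a ≤ c := by
  induction t generalizing a with
  | nil => simpa using ha
  | cons x xs ih =>
      simp only [List.foldl_cons]
      exact ih (max a x) (by have := h x (by simp); omega) (fun y hy => h y (by simp [hy]))

-- running maximum of the per-prefix overlaps = greatest i matching any prefix
theorem pv_max_eq_gdown (L : List Char) (lps : List (List Char)) (n : Nat) (hn : n ≤ L.length) :
    lps.foldl (fun b pl => max b (pvGdown (fun i => PySem.Chars.endswith L (pl.take i)) (min pl.length n))) 0
      = pvGdown (pvPA L lps) n := by
  have hmap : lps.foldl (fun b pl => max b (pvGdown (fun i => PySem.Chars.endswith L (pl.take i)) (min pl.length n))) 0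
      = (lps.map (fun pl => pvGdown (fun i => PySem.Chars.endswith L (pl.take i)) (min pl.length n))).foldl max 0 := by
    rw [List.foldl_map]
  set R := pvGdown (pvPA L lps) n with hR
  apply Nat.le_antisymm
  · rw [hmap]
    apply pv_foldl_max_le _ _ _ (Nat.zero_le _)
    intro y hy
    simp only [List.mem_map] at hy
    obtain ⟨pl, hpl, rfl⟩ := hy
    set v := pvGdown (fun i => PySem.Chars.endswith L (pl.take i)) (min pl.length n) with hv
    rcases Nat.eq_zero_or_pos v with h0 | h0
    · omega
    · have hq : PySem.Chars.endswith L (pl.take v) = true := pvGdown_holds _ _ h0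
      have hvle : v ≤ min pl.length n := pvGdown_le _ _
      have hPA : pvPA L lps v = true := by
        simp only [pvPA, List.any_eq_true]
        exact ⟨pl, hpl, (pv_sw_ew L pl v h0 (by omega)).mpr ⟨by omega, hq⟩⟩
      exact pvGdown_ge _ _ _ hPA (by omega)
  · rcases Nat.eq_zero_or_pos R with h0 | h0
    · omega
    · have hPA : pvPA L lps R = true := pvGdown_holds _ _ h0
      have hRn : R ≤ n := pvGdown_le _ _
      simp only [pvPA, List.any_eq_true] at hPA
      obtain ⟨pl, hpl, hsw⟩ := hPA
      have hsw2 := (pv_sw_ew L pl R h0 (by omega)).mp hsw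
      have hle : R ≤ pvGdown (fun i => PySem.Chars.endswith L (pl.take i)) (min pl.length n) :=
        pvGdown_ge _ _ _ hsw2.2 (by omega)
      rw [hmap]
      have := (PySem.List.le_foldl_max
        (lps.map (fun pl => pvGdown (fun i => PySem.Chars.endswith L (pl.take i)) (min pl.length n))) 0).2
      exact le_trans hle (this _ (List.mem_map_of_mem hpl))

theorem pv_toNat_min (a : Nat) (b : Int) : (min (a : Int) b).toNat = min a b.toNat := by omega

-- ===== VERDICT (by name: the statement is the Claim_ definition above) =====
theorem split_at_any_boundary_py_spec : Claim_equal_split_at_any_boundary_py := by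
  intro text prefixes _hdom _hpre
  unfold Spec_split_at_any_boundary_py
  simp only [split_at_any_boundary_py, split_at_any_boundary_py_alt]
  rw [List.map_map]
  have hcaps : (prefixes.map ((fun p => p.length) ∘ (fun p => PySem.Chars.lower p.toList)))
      = prefixes.map (fun p => p.toList.length) := by
    exact List.map_congr_left (fun p _ => pv_length_lower _)
  rw [hcaps]
  set L := PySem.Chars.lower text.toList with hL
  have hlen : L.length = text.toList.length := pv_length_lower _
  set lps := prefixes.map (fun p => PySem.Chars.lower p.toList) with hlps
  set cap : Int :=
    min (((PySem.List.max? (prefixes.map (fun p => p.toList.length)) (fun x => x)).getD 0 : Nat) - 1 : Int)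
        (text.toList.length : Int) with hcap
  set n : Nat := cap.toNat with hn
  have hnle : n ≤ L.length := by rw [hlen]; omega
  have hrange : PySem.List.pyRange cap 0 (-1) = PySem.List.pyRange (n : Int) 0 (-1) := by
    by_cases hc : cap ≤ 0
    · rw [PySem.List.pyRange_neg_one_eq_nil hc,
          PySem.List.pyRange_neg_one_eq_nil (by omega)]
    · congr 1; omega
  rw [hrange, pvAloop_eq text L lps n hnle hlen]
  have hfold : prefixes.foldl (fun b p =>
      max b (pvOverlap L (PySem.Chars.lower p.toList) (min (((PySem.Chars.lower p.toList).length : Int)) cap).toNat)) 0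
      = pvGdown (pvPA L lps) n := by
    rw [← pv_max_eq_gdown L lps n hnle, hlps, List.foldl_map]
    congr 1
    funext b p
    rw [pvOverlap_eq, pv_toNat_min]
  rw [hfold]
  set m := pvGdown (pvPA L lps) n with hm
  rcases Nat.eq_zero_or_pos m with h0 | h0
  · rw [h0]; simp [pvGout]
  · rw [if_pos h0, pvGout, if_pos h0,
        PySem.List.slice_to_neg_natCast text.toList m h0,
        PySem.List.slice_from_neg_natCast text.toList m h0]
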